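-- pv_equiv track=rewrite | github.com/Teffandi/NTT-Hardware | Python/radix 8.py | radix8_fft
-- ===== SOURCE A (Python) =====
-- def radix8_fft(a, N, prime, psi):
--     n = int(N / 8)
--
--     a_ntt = [0 for i in range(N)]
--
--     for j in range(N):
--         sum0 = sum1 = sum2 = sum3 = sum4 = sum5 = sum6 = sum7 = 0
--         for i in range(n):
--             power = 8*i*(2*j+1)
--             sum0 += psi**power*a[8*i]
--             sum1 += psi**(4*(2*j+1)) * psi**(power)*a[8*i+4]
--             sum2 += psi**(2*(2*j+1)) * psi**(power)*a[8*i+2]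
--             sum3 += psi**(6*(2*j+1)) * psi**(power)*a[8*i+6]
--             sum4 += psi**(2*j+1) * psi**(power)*a[8*i+1]
--             sum5 += psi**(5*(2*j+1)) * psi**(power)*a[8*i+5]
--             sum6 += psi**(3*(2*j+1)) * psi**(power)*a[8*i+3]
--             sum7 += psi**(7*(2*j+1))  * psi**(power)*a[8*i+7]
--         a_ntt[j] = (sum0+sum1+sum2+sum3+sum4+sum5+sum6+sum7) % prime
--
--     return a_ntt
-- ===== SOURCE B (Python) =====
-- def radix8_fft(a, N, prime, psi):
--     # Same negacyclic transform, computed with modular arithmetic (pow with a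
--     # modulus and a running power) instead of huge exact integer powers.
--     M = 8 * (N // 8)
--     out = []
--     for j in range(N):
--         w = pow(psi, 2 * j + 1, prime)
--         acc = 0
--         pw = 1
--         for m in range(M):
--             acc = (acc + a[m] * pw) % prime
--             pw = (pw * w) % prime
--         out.append(acc)
--     return out
-- ===== Notes on version B (the rewrite author's own statement) =====
-- stated objective: alternative
-- what changed: Replaces the radix-8 split with giant exact integer powers psi**(8*i*(2j+1)) by a single flat loop per output coefficient doing modular accumulation (pow(psi,2j+1,prime) and a running power reduced mod prime each step), so all intermediates stay bounded by prime instead of growing to millions of bits; intended as faster, measured ~400x at mid sizes, but both remain O(N^2) loops and time out at the largest probe size.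
import Mathlib
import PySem

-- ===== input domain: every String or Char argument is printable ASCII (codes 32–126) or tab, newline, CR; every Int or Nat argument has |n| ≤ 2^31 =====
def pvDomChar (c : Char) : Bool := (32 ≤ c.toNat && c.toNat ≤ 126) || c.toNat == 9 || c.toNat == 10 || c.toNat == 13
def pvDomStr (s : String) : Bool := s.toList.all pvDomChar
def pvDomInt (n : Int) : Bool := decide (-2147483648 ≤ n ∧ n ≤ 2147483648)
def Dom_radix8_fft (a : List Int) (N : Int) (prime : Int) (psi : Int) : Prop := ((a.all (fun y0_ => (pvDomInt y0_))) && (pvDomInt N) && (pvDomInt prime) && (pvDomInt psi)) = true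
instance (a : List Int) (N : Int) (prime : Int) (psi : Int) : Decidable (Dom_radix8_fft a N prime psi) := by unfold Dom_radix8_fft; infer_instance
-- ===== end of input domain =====

-- B replaces A's giant exact integer powers (psi**(8*i*(2j+1))) by one flat modular loop per
-- output coefficient (pow with modulus + a running power reduced mod prime): same O(N^2) loop
-- count, but all intermediates stay bounded by prime (objective: alternative).

-- ===== PORT A =====
-- inner radix-8 loop of A: the 8 running sums (sum0..sum7) over i in range(n)
def pvAInner (a : List Int) (psi j n : Int) : Int × Int × Int × Int × Int × Int × Int × Int :=
  (PySem.List.pyRange 0 n 1).foldl (fun s i =>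
    let power := (8*i*(2*j+1)).toNat
    (s.1 + psi ^ power * PySem.List.pyGetD a (8*i) 0,
     s.2.1 + psi ^ (4*(2*j+1)).toNat * psi ^ power * PySem.List.pyGetD a (8*i+4) 0,
     s.2.2.1 + psi ^ (2*(2*j+1)).toNat * psi ^ power * PySem.List.pyGetD a (8*i+2) 0,
     s.2.2.2.1 + psi ^ (6*(2*j+1)).toNat * psi ^ power * PySem.List.pyGetD a (8*i+6) 0,
     s.2.2.2.2.1 + psi ^ (2*j+1).toNat * psi ^ power * PySem.List.pyGetD a (8*i+1) 0,
     s.2.2.2.2.2.1 + psi ^ (5*(2*j+1)).toNat * psi ^ power * PySem.List.pyGetD a (8*i+5) 0,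
     s.2.2.2.2.2.2.1 + psi ^ (3*(2*j+1)).toNat * psi ^ power * PySem.List.pyGetD a (8*i+3) 0,
     s.2.2.2.2.2.2.2 + psi ^ (7*(2*j+1)).toNat * psi ^ power * PySem.List.pyGetD a (8*i+7) 0))
    (0, 0, 0, 0, 0, 0, 0, 0)
  -- exponents are ≥ 0 for every i, j the ranges produce, so '.toNat' is exact

-- a_ntt[j] = (sum0+sum1+sum2+sum3+sum4+sum5+sum6+sum7) % prime
def pvARow (a : List Int) (psi prime j n : Int) : Int :=
  let s := pvAInner a psi j n
  PySem.Int.mod (s.1 + s.2.1 + s.2.2.1 + s.2.2.2.1 + s.2.2.2.2.1 + s.2.2.2.2.2.1 + s.2.2.2.2.2.2.1 + s.2.2.2.2.2.2.2) prime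

-- n = int(N/8) is truncating division (exact here: |N| ≤ 2^31 < 2^53 on Dom); a_ntt = [0]*N, then a_ntt[j] = …
def radix8_fft (a : List Int) (N : Int) (prime : Int) (psi : Int) : List Int :=
  let n := PySem.Int.truncdiv N 8
  let a_ntt : List Int := List.replicate N.toNat 0
  (PySem.List.pyRange 0 N 1).foldl (fun a_ntt j => PySem.List.pySetD a_ntt j (pvARow a psi prime j n)) a_ntt

-- ===== PORT B =====
-- inner loop of B: (acc, pw) over m in range(M), both reduced mod prime each step
def pvBInner (a : List Int) (w prime M : Int) : Int × Int :=
  (PySem.List.pyRange 0 M 1).foldl (fun st m =>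
    (PySem.Int.mod (st.1 + PySem.List.pyGetD a m 0 * st.2) prime,
     PySem.Int.mod (st.2 * w) prime)) (0, 1)

-- one iteration of B's outer loop: w = pow(psi, 2*j+1, prime), then the acc of the inner loop
def pvBRow (a : List Int) (psi prime M j : Int) : Int :=
  let w := PySem.Int.powMod psi (2*j+1).toNat prime
  (pvBInner a w prime M).1

def radix8_fft_alt (a : List Int) (N : Int) (prime : Int) (psi : Int) : List Int :=
  let M := 8 * PySem.Int.floordiv N 8
  (PySem.List.pyRange 0 N 1).foldl (fun out j => out ++ [pvBRow a psi prime M j]) []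

-- ===== PRECONDITION & SPEC =====
-- Pre_ excludes exactly the inputs where the Python A raises: for N > 0 it needs
-- prime ≠ 0 ('% prime' is ZeroDivisionError) and a long enough a (IndexError at a[8*i+7]).
def Pre_radix8_fft (a : List Int) (N : Int) (prime : Int) (psi : Int) : Prop :=
  0 < N → (prime ≠ 0 ∧ 8 * PySem.Int.floordiv N 8 ≤ (a.length : Int))
instance (a : List Int) (N : Int) (prime : Int) (psi : Int) : Decidable (Pre_radix8_fft a N prime psi) := by unfold Pre_radix8_fft; infer_instance
def pvWitness_radix8_fft : List Int × Int × Int × Int := ([1, 2, 3, 4, 5, 6, 7, 8], 8, 17, 3)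

def Spec_radix8_fft (a : List Int) (N : Int) (prime : Int) (psi : Int) (out : List Int) : Prop := out = radix8_fft_alt a N prime psi
instance (a : List Int) (N : Int) (prime : Int) (psi : Int) (out : List Int) : Decidable (Spec_radix8_fft a N prime psi out) := by unfold Spec_radix8_fft; infer_instance

-- ===== CLAIM (what is proved, stated in full; the proofs are below) =====
def Claim_equal_radix8_fft : Prop := ∀ (a : List Int) (N : Int) (prime : Int) (psi : Int), Dom_radix8_fft a N prime psi → Pre_radix8_fft a N prime psi → Spec_radix8_fft a N prime psi (radix8_fft a N prime psi)

-- ===== LEMMAS AND PROOFS =====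

-- exact partial sum Σ_{m<t} w^m · a[m] (the value both inner loops compute mod prime)
def pvPsum (a : List Int) (w : Int) (t : Nat) : Int :=
  ((List.range t).map (fun (m : Nat) => w ^ m * PySem.List.pyGetD a (m : Int) 0)).sum

-- exact value of A's running sum for residue class c: Σ_{i<t} psi^(c·e+8·i·e) · a[8i+c]
def pvCompA (a : List Int) (psi : Int) (e c t : Nat) : Int :=
  ((List.range t).map (fun (i : Nat) => psi ^ (c*e + 8*i*e) * PySem.List.pyGetD a ((8*i+c : Nat) : Int) 0)).sum

lemma pvMod_modEq (x p : Int) : PySem.Int.mod x p ≡ x [ZMOD p] := by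
  have h := PySem.Int.floordiv_mul_add_mod x p
  exact Int.modEq_iff_dvd.mpr ⟨PySem.Int.floordiv x p, by linarith⟩

-- Python '%' maps congruent numbers to the same representative (any p ≠ 0)
lemma pvModCongr {p x y : Int} (hp : p ≠ 0) (h : x ≡ y [ZMOD p]) :
    PySem.Int.mod x p = PySem.Int.mod y p := by
  have hd : p ∣ PySem.Int.mod x p - PySem.Int.mod y p := by
    have h1 := pvMod_modEq x p
    have h2 := pvMod_modEq y p
    exact Int.ModEq.dvd (((h1.trans h).trans h2.symm)).symm
  have hb : |PySem.Int.mod x p - PySem.Int.mod y p| < |p| := by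
    rcases lt_or_gt_of_ne hp with hneg | hpos
    · obtain ⟨b1, b2⟩ := PySem.Int.mod_neg_bounds x hneg
      obtain ⟨b3, b4⟩ := PySem.Int.mod_neg_bounds y hneg
      rw [abs_of_neg hneg, abs_lt]
      omega
    · have b1 := PySem.Int.mod_nonneg x hpos
      have b2 := PySem.Int.mod_lt x hpos
      have b3 := PySem.Int.mod_nonneg y hpos
      have b4 := PySem.Int.mod_lt y hpos
      rw [abs_of_pos hpos, abs_lt]
      omega
  have h0 := Int.eq_zero_of_abs_lt_dvd ((abs_dvd _ _).mpr hd) hb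
  omega

-- A's 8 running sums after t iterations, componentwise (e = 2j+1 as a Nat)
lemma pvAInner_eq (a : List Int) (psi j : Int) (e : Nat) (he : 2*j+1 = (e : Int)) (t : Nat) :
    pvAInner a psi j (t : Int) =
      (pvCompA a psi e 0 t, pvCompA a psi e 4 t, pvCompA a psi e 2 t, pvCompA a psi e 6 t,
       pvCompA a psi e 1 t, pvCompA a psi e 5 t, pvCompA a psi e 3 t, pvCompA a psi e 7 t) := by
  induction t with
  | zero => simp [pvAInner, pvCompA, PySem.List.pyRange_one_eq_nil]
  | succ t ih =>
    unfold pvAInner at ih ⊢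
    rw [show ((t+1 : Nat) : Int) = (t:Int)+1 by push_cast; ring,
        PySem.List.pyRange_one_succ_right (by positivity), List.foldl_append, ih]
    simp only [List.foldl_cons, List.foldl_nil, he]
    rw [show (8*(t:Int)*(e:Int)).toNat = 8*t*e by
          rw [show (8*(t:Int)*(e:Int)) = ((8*t*e : Nat) : Int) by push_cast; ring]; exact Int.toNat_natCast _,
        show (4*(e:Int)).toNat = 4*e by
          rw [show (4*(e:Int)) = ((4*e : Nat) : Int) by push_cast; ring]; exact Int.toNat_natCast _,
        show (2*(e:Int)).toNat = 2*e by
          rw [show (2*(e:Int)) = ((2*e : Nat) : Int) by push_cast; ring]; exact Int.toNat_natCast _,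
        show (6*(e:Int)).toNat = 6*e by
          rw [show (6*(e:Int)) = ((6*e : Nat) : Int) by push_cast; ring]; exact Int.toNat_natCast _,
        show ((e:Int)).toNat = e from Int.toNat_natCast _,
        show (5*(e:Int)).toNat = 5*e by
          rw [show (5*(e:Int)) = ((5*e : Nat) : Int) by push_cast; ring]; exact Int.toNat_natCast _,
        show (3*(e:Int)).toNat = 3*e by
          rw [show (3*(e:Int)) = ((3*e : Nat) : Int) by push_cast; ring]; exact Int.toNat_natCast _,
        show (7*(e:Int)).toNat = 7*e by
          rw [show (7*(e:Int)) = ((7*e : Nat) : Int) by push_cast; ring]; exact Int.toNat_natCast _]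
    simp only [Prod.mk.injEq]
    refine ⟨?_, ?_, ?_, ?_, ?_, ?_, ?_, ?_⟩ <;>
    · simp only [pvCompA, List.range_succ, List.map_append, List.sum_append, List.map_cons,
        List.map_nil, List.sum_cons, List.sum_nil, pow_add]
      push_cast
      ring_nf

-- A's total (in A's own addition order) is the plain power sum over all 8n positions
lemma pvTotal (a : List Int) (psi : Int) (e t : Nat) :
    pvCompA a psi e 0 t + pvCompA a psi e 4 t + pvCompA a psi e 2 t + pvCompA a psi e 6 t +
    pvCompA a psi e 1 t + pvCompA a psi e 5 t + pvCompA a psi e 3 t + pvCompA a psi e 7 t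
      = pvPsum a (psi ^ e) (8*t) := by
  induction t with
  | zero => simp [pvCompA, pvPsum]
  | succ t ih =>
    rw [show 8*(t+1) = 8*t+8 by ring]
    unfold pvPsum
    rw [List.range_add, List.map_append, List.sum_append,
        show List.range 8 = [0,1,2,3,4,5,6,7] from rfl]
    unfold pvPsum at ih
    rw [← ih]
    simp only [pvCompA, List.range_succ, List.map_append, List.sum_append, List.map_cons,
      List.map_nil, List.sum_cons, List.sum_nil, pow_add]
    push_cast
    ring_nf

-- B's inner loop invariant: acc is the power sum mod p, pw tracks w0^t mod p
lemma pvBInner_spec (a : List Int) (w w0 p : Int) (hp : p ≠ 0) (hw : w ≡ w0 [ZMOD p]) (t : Nat) :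
    (pvBInner a w p (t : Int)).1 = PySem.Int.mod (pvPsum a w0 t) p ∧
    (pvBInner a w p (t : Int)).2 ≡ w0 ^ t [ZMOD p] := by
  induction t with
  | zero =>
    constructor
    · simp [pvBInner, pvPsum, PySem.Int.mod, Int.zero_fmod]
    · simp [pvBInner]
  | succ t ih =>
    unfold pvBInner at ih ⊢
    rw [show ((t+1 : Nat) : Int) = (t:Int)+1 by push_cast; ring,
        PySem.List.pyRange_one_succ_right (by positivity), List.foldl_append]
    simp only [List.foldl_cons, List.foldl_nil]
    constructor
    · rw [ih.1]
      refine pvModCongr hp (Int.ModEq.trans (Int.ModEq.add (pvMod_modEq _ p) (ih.2.mul_left _)) ?_)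
      rw [show pvPsum a w0 t + PySem.List.pyGetD a (↑t) 0 * w0 ^ t = pvPsum a w0 (t+1) by
        simp [pvPsum, List.range_succ]; ring]
    · refine Int.ModEq.trans (pvMod_modEq _ p) (Int.ModEq.trans (ih.2.mul hw) ?_)
      rw [pow_succ]

lemma pvTakeSet (l : List Int) (k : Nat) (v : Int) (h : k < l.length) :
    (l.set k v).take (k+1) = l.take k ++ [v] := by
  rw [List.set_eq_take_append_cons_drop, if_pos h, List.take_append]
  simp [List.length_take, Nat.min_eq_left (le_of_lt h)]

-- filling a zero list of length N at positions k..N-1 in order is take k ++ map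
lemma pvFoldSet (f : Int → Int) (N : Int) (k : Nat) (l : List Int) (hl : l.length = N.toNat)
    (hk : (k : Int) ≤ N) :
    (PySem.List.pyRange (k : Int) N 1).foldl (fun acc j => PySem.List.pySetD acc j (f j)) l
      = l.take k ++ (PySem.List.pyRange (k : Int) N 1).map f := by
  suffices H : ∀ d (k : Nat) (l : List Int), l.length = N.toNat → (k : Int) ≤ N → N.toNat - k = d →
      (PySem.List.pyRange (k : Int) N 1).foldl (fun acc j => PySem.List.pySetD acc j (f j)) l
        = l.take k ++ (PySem.List.pyRange (k : Int) N 1).map f by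
    exact H _ k l hl hk rfl
  intro d
  induction d with
  | zero =>
    intro k l hl hk hd
    rw [PySem.List.pyRange_one_eq_nil (show N ≤ (k:Int) by omega)]
    simp [List.take_of_length_le (show l.length ≤ k by omega)]
  | succ d ih =>
    intro k l hl hk hd
    have hkN : (k : Int) < N := by omega
    rw [PySem.List.pyRange_one_cons hkN]
    simp only [List.foldl_cons, List.map_cons]
    rw [show (k : Int) + 1 = ((k+1 : Nat) : Int) by push_cast; ring]
    rw [ih (k+1) (PySem.List.pySetD l (k : Int) (f (k : Int)))
        (by simp [PySem.List.pySetD_natCast]; omega) (by omega) (by omega)]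
    rw [PySem.List.pySetD_natCast]
    rw [pvTakeSet l k (f (k : Int)) (by omega)]
    simp [List.append_assoc]

-- the two rows agree for every j ≥ 0 (p ≠ 0): both are (Σ_m psi^(m(2j+1)) a[m]) % p
lemma pvRow_eq (a : List Int) (psi prime j : Int) (t : Nat) (hp : prime ≠ 0) (hj : 0 ≤ j) :
    pvARow a psi prime j (t : Int) = pvBRow a psi prime ((8*t : Nat) : Int) j := by
  have he : 2*j+1 = (((2*j+1).toNat : Nat) : Int) := (Int.toNat_of_nonneg (by omega)).symm
  unfold pvARow pvBRow
  rw [pvAInner_eq a psi j (2*j+1).toNat he t]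
  simp only []
  rw [pvTotal a psi (2*j+1).toNat t]
  rw [(pvBInner_spec a (PySem.Int.powMod psi (2*j+1).toNat prime) (psi ^ (2*j+1).toNat) prime hp
        (by unfold PySem.Int.powMod; exact pvMod_modEq _ prime) (8*t)).1]

-- ===== VERDICT (by name: the statement is the Claim_ definition above) =====
theorem radix8_fft_spec : Claim_equal_radix8_fft := by
  intro a N prime psi _ hpre
  unfold Spec_radix8_fft radix8_fft radix8_fft_alt
  by_cases hN : N ≤ 0
  · rw [PySem.List.pyRange_one_eq_nil hN]
    simp [Int.toNat_of_nonpos hN]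
  · rw [not_le] at hN
    obtain ⟨hp, -⟩ := hpre hN
    have htr : PySem.Int.truncdiv N 8 = ((N.toNat / 8 : Nat) : Int) := by
      unfold PySem.Int.truncdiv
      rw [Int.tdiv_eq_ediv_of_nonneg (by omega)]
      omega
    have hfl : 8 * PySem.Int.floordiv N 8 = ((8 * (N.toNat / 8) : Nat) : Int) := by
      rw [PySem.Int.floordiv_eq_ediv_of_pos (by norm_num)]
      omega
    simp only [htr, hfl]
    rw [show (0:Int) = ((0:Nat):Int) from rfl,
        pvFoldSet (fun j => pvARow a psi prime j ((N.toNat / 8 : Nat) : Int)) N 0 _ (by simp) (by omega),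
        PySem.List.foldl_append_singleton_eq_map]
    simp only [List.take_zero, List.nil_append]
    refine List.map_congr_left ?_
    intro j hj
    rw [PySem.List.mem_pyRange_one] at hj
    exact pvRow_eq a psi prime j (N.toNat / 8) hp hj.1
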